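-- pv_equiv track=rewrite | github.com/dianarrmiranda/1Ano_EI | FudamentosProg/aula10/treinooo.py | inv
-- ===== SOURCE A (Python) =====
-- def inv(lst,l):
--     n = len(lst)
--     if n < 1:
--         return lst
--     else:
--         l.append(lst[-1])
--         inv(lst[:-1],l)
--     return l
-- ===== SOURCE B (Python) =====
-- def inv(lst, l):
--     if len(lst) < 1:
--         return lst
--     for x in reversed(lst):
--         l.append(x)
--     return l
-- ===== Notes on version B (the rewrite author's own statement) =====
-- stated objective: faster
-- what changed: Replaces A's recursion with per-call list slicing (lst[:-1] copies at every level, O(n^2) total) by a single iterative pass appending elements last-to-first; A's return of lst itself on empty input is reproduced, and both mutate l identically.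
import Mathlib
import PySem

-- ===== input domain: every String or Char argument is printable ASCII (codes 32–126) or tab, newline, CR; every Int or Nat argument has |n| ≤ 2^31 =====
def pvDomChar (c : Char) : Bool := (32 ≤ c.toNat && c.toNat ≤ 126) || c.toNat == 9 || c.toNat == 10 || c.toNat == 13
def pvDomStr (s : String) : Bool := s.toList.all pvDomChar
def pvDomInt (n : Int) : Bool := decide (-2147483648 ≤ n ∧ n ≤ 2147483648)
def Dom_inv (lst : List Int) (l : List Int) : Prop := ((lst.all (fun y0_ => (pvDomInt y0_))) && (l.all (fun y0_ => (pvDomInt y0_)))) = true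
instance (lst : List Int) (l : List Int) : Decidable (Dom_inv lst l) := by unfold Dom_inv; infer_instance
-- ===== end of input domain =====

-- B replaces A's recursion-with-slicing by one iterative pass over reversed lst; return-value equivalence proved (both mutate l the same way in Python).


-- ===== PORT A =====
-- invMut models the in-place effect of Python's inv on l: the final contents of l
-- after `l.append(lst[-1]); inv(lst[:-1], l)` has run to completion.
def invMut (lst : List Int) (l : List Int) : List Int :=
  if lst.length < 1 then l
  else invMut (PySem.List.slice lst none (some (-1)))
              (l ++ [PySem.List.pyGetD lst (-1) 0])
termination_by lst.length
decreasing_by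
  simp [PySem.List.slice_to_neg_one]
  omega

def inv (lst : List Int) (l : List Int) : List Int :=
  if lst.length < 1 then lst
  else invMut (PySem.List.slice lst none (some (-1)))
              (l ++ [PySem.List.pyGetD lst (-1) 0])

-- ===== PORT B =====
def inv_alt (lst : List Int) (l : List Int) : List Int :=
  if lst.length < 1 then lst
  else lst.reverse.foldl (fun acc x => acc ++ [x]) l

-- ===== PRECONDITION & SPEC =====
def Spec_inv (lst : List Int) (l : List Int) (out : List Int) : Prop := out = inv_alt lst l
instance (lst : List Int) (l : List Int) (out : List Int) : Decidable (Spec_inv lst l out) := by unfold Spec_inv; infer_instance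

-- ===== CLAIM (what is proved, stated in full; the proofs are below) =====
def Claim_equal_inv : Prop := ∀ (lst : List Int) (l : List Int), Dom_inv lst l → Spec_inv lst l (inv lst l)

-- ===== LEMMAS AND PROOFS =====
theorem rev_step (lst : List Int) (hne : lst ≠ []) :
    [PySem.List.pyGetD lst (-1) 0] ++ lst.dropLast.reverse = lst.reverse := by
  rw [PySem.List.pyGetD_neg_one lst 0 hne]
  conv_rhs => rw [← List.dropLast_concat_getLast hne]
  simp

theorem invMut_eq (lst l : List Int) : invMut lst l = l ++ lst.reverse := by
  fun_induction invMut lst l with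
  | case1 lst l h =>
    have : lst = [] := List.eq_nil_of_length_eq_zero (by omega)
    simp [this]
  | case2 lst l h ih =>
    have hne : lst ≠ [] := by intro he; simp [he] at h
    rw [ih, PySem.List.slice_to_neg_one]
    rw [List.append_assoc, rev_step lst hne]

theorem foldl_snoc (xs l : List Int) :
    xs.foldl (fun acc x => acc ++ [x]) l = l ++ xs := by
  induction xs generalizing l with
  | nil => simp
  | cons x xs ih => simp [List.foldl, ih]

-- ===== VERDICT (by name: the statement is the Claim_ definition above) =====
theorem inv_spec : Claim_equal_inv := by
  intro lst l _
  unfold Spec_inv inv inv_alt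
  split
  · rfl
  · rw [invMut_eq, foldl_snoc, PySem.List.slice_to_neg_one]
    next h =>
    have hne : lst ≠ [] := by intro he; simp [he] at h
    rw [List.append_assoc, rev_step lst hne]
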